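-- pv_equiv track=rewrite | github.com/anason411local/Sales_calls_analysis | ai_agents/call_performance_analyzer/reports/report_generator.py | _get_top_items
-- ===== SOURCE A (Python) =====
-- from typing import Dict, List
--
-- def _get_top_items(items: List[str], top_n: int = 10) -> str:
--     """Get top N most common items from list"""
--     from collections import Counter
--
--     if not items:
--         return "None identified"
--
--     counter = Counter(items)
--     top_items = counter.most_common(top_n)
--
--     result = []
--     for item, count in top_items:
--         result.append(f"- {item} (mentioned {count} times)")
--
--     return "\n".join(result)
-- ===== SOURCE B (Python) =====
-- def _get_top_items(items, top_n=10):
--     """Get top N most common items from list"""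
--     if not items:
--         return "None identified"
--
--     counts = {}
--     for x in items:
--         counts[x] = counts.get(x, 0) + 1
--
--     # pigeonhole: bucket the distinct items by their count (first-occurrence order kept)
--     buckets = {}
--     maxc = 0
--     for x, c in counts.items():
--         buckets.setdefault(c, []).append(x)
--         if c > maxc:
--             maxc = c
--
--     # emit buckets from the highest count down until top_n lines are out
--     lines = []
--     c = maxc
--     while c > 0 and len(lines) < top_n:
--         for x in buckets.get(c, []):
--             if len(lines) >= top_n:
--                 break
--             lines.append(f"- {x} (mentioned {c} times)")
--         c -= 1
--     return "\n".join(lines)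
-- ===== Notes on version B (the rewrite author's own statement) =====
-- stated objective: alternative
-- what changed: Replaces Counter plus most_common (hash count, then heap-based partial sort by comparisons) by pigeonhole selection: count into a dict in one pass, group the distinct items into buckets keyed by their count, then emit buckets from the highest count down until top_n lines are produced - no sort and no heap, no comparison-based selection at all.
import Mathlib
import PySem

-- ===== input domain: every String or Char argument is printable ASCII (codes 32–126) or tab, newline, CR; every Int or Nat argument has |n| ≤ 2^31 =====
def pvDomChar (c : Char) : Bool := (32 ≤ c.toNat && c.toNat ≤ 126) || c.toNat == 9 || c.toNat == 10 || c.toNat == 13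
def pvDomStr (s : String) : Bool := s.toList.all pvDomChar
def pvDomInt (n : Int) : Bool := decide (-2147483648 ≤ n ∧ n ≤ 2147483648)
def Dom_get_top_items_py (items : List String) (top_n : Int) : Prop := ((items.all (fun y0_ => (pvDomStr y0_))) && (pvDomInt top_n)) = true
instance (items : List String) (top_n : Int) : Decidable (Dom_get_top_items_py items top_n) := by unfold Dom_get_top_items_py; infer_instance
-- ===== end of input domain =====

-- B replaces Counter.most_common (hash count + heap-based partial sort) by pigeonhole selection:
-- count once, bucket the distinct items by their count, emit buckets from the highest count down
-- (objective: alternative — no sort, no heap, no comparison-based selection).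

-- ===== PORT A =====
-- counter.most_common(n) = heapq.nlargest(n, items, key=count), documented equivalent to
-- sorted(items, key=count, reverse=True)[:n] with n<0 giving [] (hence .toNat).
def get_top_items_py (items : List String) (top_n : Int) : String :=
  if items = [] then "None identified"
  else
    let counter : PySem.Dict String Int := PySem.Dict.counter items
    let top_items := (PySem.List.sorted counter.items (fun p => p.2) true).take top_n.toNat
    let result := top_items.foldl
      (fun acc p => acc ++ ["- " ++ p.1 ++ " (mentioned " ++ PySem.Int.toStr p.2 ++ " times)"]) []
    PySem.Str.join "\n" result

-- ===== PORT B =====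
-- the inner 'for x in buckets.get(c, [])' loop; the 'break' is a no-op body once len(lines) ≥ top_n
def pvEmitBucket (top_n : Int) (c : Int) (bucket : List String) (lines : List String) : List String :=
  bucket.foldl
    (fun lines x =>
      if top_n ≤ (lines.length : Int) then lines
      else lines ++ ["- " ++ x ++ " (mentioned " ++ PySem.Int.toStr c ++ " times)"])
    lines

-- the outer 'while c > 0 and len(lines) < top_n' loop, counting c down (fuel = current c)
def pvEmit (top_n : Int) (buckets : PySem.Dict Int (List String)) : Nat → List String → List String
  | 0, lines => lines
  | c + 1, lines =>
    if (lines.length : Int) < top_n then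
      pvEmit top_n buckets c
        (pvEmitBucket top_n ((c : Int) + 1) (buckets.getD ((c : Int) + 1) []) lines)
    else lines

def get_top_items_py_alt (items : List String) (top_n : Int) : String :=
  if items = [] then "None identified"
  else
    let counts : PySem.Dict String Int :=
      items.foldl (fun d x => d.insert x (d.getD x 0 + 1)) PySem.Dict.empty
    -- one loop over counts.items(): buckets.setdefault(c, []).append(x);  if c > maxc: maxc = c
    let bm :=
      counts.items.foldl
        (fun s kv => (s.1.modify kv.2 [] (· ++ [kv.1]), if s.2 < kv.2 then kv.2 else s.2))
        (PySem.Dict.empty, (0 : Int))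
    PySem.Str.join "\n" (pvEmit top_n bm.1 bm.2.toNat [])

-- ===== PRECONDITION & SPEC =====
def Spec_get_top_items_py (items : List String) (top_n : Int) (out : String) : Prop := out = get_top_items_py_alt items top_n
instance (items : List String) (top_n : Int) (out : String) : Decidable (Spec_get_top_items_py items top_n out) := by unfold Spec_get_top_items_py; infer_instance

-- ===== CLAIM (what is proved, stated in full; the proofs are below) =====
def Claim_equal_get_top_items_py : Prop := ∀ (items : List String) (top_n : Int), Dom_get_top_items_py items top_n → Spec_get_top_items_py items top_n (get_top_items_py items top_n)

-- ===== LEMMAS AND PROOFS =====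

-- the line-formatting function both programs share
def pvLineKV (p : String × Int) : String :=
  "- " ++ p.1 ++ " (mentioned " ++ PySem.Int.toStr p.2 ++ " times)"

-- the buckets, flattened from count c down to count 1
def pvFlat (pool : List (String × Int)) : Nat → List (String × Int)
  | 0 => []
  | c + 1 => pool.filter (fun kv => kv.2 == ((c : Int) + 1)) ++ pvFlat pool c

lemma pv_flat_nil : ∀ c, pvFlat [] c = []
  | 0 => rfl
  | c + 1 => by simp [pvFlat, pv_flat_nil c]

lemma pv_mem_flat (pool : List (String × Int)) :
    ∀ (c : Nat) (kv : String × Int), kv ∈ pvFlat pool c → kv ∈ pool ∧ kv.2 ≤ (c : Int) := by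
  intro c
  induction c with
  | zero => intro kv h; simp [pvFlat] at h
  | succ c ih =>
    intro kv h
    rcases List.mem_append.mp h with h | h
    · have := List.mem_filter.mp h
      refine ⟨this.1, ?_⟩
      have : kv.2 = (c : Int) + 1 := by simpa using this.2
      omega
    · obtain ⟨h1, h2⟩ := ih kv h
      exact ⟨h1, by push_cast; omega⟩

lemma pv_insertBy_append_left (bf : (String × Int) → (String × Int) → Bool) (x : String × Int) :
    ∀ (l₁ l₂ : List (String × Int)), (∀ y ∈ l₁, bf x y = false) →
      PySem.List.insertBy bf x (l₁ ++ l₂) = l₁ ++ PySem.List.insertBy bf x l₂ := by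
  intro l₁
  induction l₁ with
  | nil => intro l₂ _; simp
  | cons y t ih =>
    intro l₂ h
    have hy : bf x y = false := h y (by simp)
    simp only [List.cons_append, PySem.List.insertBy, hy, Bool.false_eq_true, if_false]
    rw [ih l₂ (fun z hz => h z (by simp [hz]))]

lemma pv_insertBy_all_true (bf : (String × Int) → (String × Int) → Bool) (x : String × Int)
    (l : List (String × Int)) (h : ∀ y ∈ l, bf x y = true) :
    PySem.List.insertBy bf x l = x :: l := by
  cases l with
  | nil => rfl
  | cons y t => simp [PySem.List.insertBy, h y (by simp)]

lemma pv_flat_append_high (xs : List (String × Int)) (x : String × Int) :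
    ∀ (c : Nat), (c : Int) < x.2 → pvFlat (xs ++ [x]) c = pvFlat xs c := by
  intro c
  induction c with
  | zero => intro _; rfl
  | succ c ih =>
    intro h
    have hx : (x.2 == ((c : Int) + 1)) = false := by simp; push_cast at h ⊢; omega
    simp only [pvFlat, List.filter_append, List.filter_cons, hx, Bool.false_eq_true, if_false,
      List.filter_nil, List.append_nil]
    rw [ih (by push_cast at h ⊢; omega)]

lemma pv_insert_flat :
    ∀ (c : Nat) (xs : List (String × Int)) (x : String × Int), 1 ≤ x.2 → x.2 ≤ (c : Int) →
      PySem.List.insertBy (fun a b => decide (b.2 < a.2)) x (pvFlat xs c) = pvFlat (xs ++ [x]) c := by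
  intro c
  induction c with
  | zero => intro xs x h1 h2; omega
  | succ c ih =>
    intro xs x h1 h2
    have hhigh : ∀ y ∈ xs.filter (fun kv => kv.2 == ((c : Int) + 1)),
        (fun a b : String × Int => decide (b.2 < a.2)) x y = false := by
      intro y hy
      have hy2 : y.2 = (c : Int) + 1 := by simpa using (List.mem_filter.mp hy).2
      simp only [decide_eq_false_iff_not, not_lt]
      push_cast at h2 ⊢
      omega
    by_cases hc : x.2 = (c : Int) + 1
    · have hall : ∀ y ∈ pvFlat xs c, (fun a b : String × Int => decide (b.2 < a.2)) x y = true := by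
        intro y hy
        have := (pv_mem_flat xs c y hy).2
        simp only [decide_eq_true_eq]
        omega
      have hxf : (x.2 == ((c : Int) + 1)) = true := by simpa using hc
      simp only [pvFlat]
      rw [pv_insertBy_append_left _ x _ _ hhigh, pv_insertBy_all_true _ x _ hall,
          List.filter_append, List.filter_cons, hxf, List.filter_nil,
          pv_flat_append_high xs x c (by omega)]
      simp
    · have hxf : (x.2 == ((c : Int) + 1)) = false := by simpa using hc
      have hle : x.2 ≤ (c : Int) := by push_cast at h2 ⊢; omega
      simp only [pvFlat]
      rw [pv_insertBy_append_left _ x _ _ hhigh, ih xs x h1 hle,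
          List.filter_append, List.filter_cons, hxf]
      simp

-- one insertion step of the left-fold insertion sort
lemma pv_sorted_rev_append_singleton (xs : List (String × Int)) (x : String × Int) :
    PySem.List.sorted (xs ++ [x]) (fun kv => kv.2) true =
      PySem.List.insertBy (fun a b => decide (b.2 < a.2)) x
        (PySem.List.sorted xs (fun kv => kv.2) true) := by
  rw [PySem.List.sorted_rev_eq_foldl_insertBy, PySem.List.sorted_rev_eq_foldl_insertBy,
      List.foldl_append, List.foldl_cons, List.foldl_nil]

-- the stable descending sort IS the bucket concatenation, highest count first
lemma pv_sorted_eq_flat :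
    ∀ (xs : List (String × Int)) (M : Nat), (∀ kv ∈ xs, 1 ≤ kv.2) → (∀ kv ∈ xs, kv.2 ≤ (M : Int)) →
      PySem.List.sorted xs (fun kv => kv.2) true = pvFlat xs M := by
  intro xs
  induction xs using List.reverseRecOn with
  | nil => intro M _ _; rw [pv_flat_nil]; rfl
  | append_singleton xs x ih =>
    intro M h1 h2
    rw [pv_sorted_rev_append_singleton,
        ih M (fun kv hkv => h1 kv (by simp [hkv])) (fun kv hkv => h2 kv (by simp [hkv]))]
    exact pv_insert_flat M xs x (h1 x (by simp)) (h2 x (by simp))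

lemma pv_emitBucket_eq (top_n c : Int) :
    ∀ (xs : List String) (lines : List String),
      pvEmitBucket top_n c xs lines =
        lines ++ (xs.map (fun x => "- " ++ x ++ " (mentioned " ++ PySem.Int.toStr c ++ " times)")).take
          (top_n.toNat - lines.length) := by
  intro xs
  induction xs with
  | nil => intro lines; simp [pvEmitBucket]
  | cons x t ih =>
    intro lines
    simp only [pvEmitBucket, List.foldl_cons]
    by_cases hge : top_n ≤ (lines.length : Int)
    · rw [if_pos hge]
      have h0 : top_n.toNat - lines.length = 0 := by omega
      have := ih lines
      simp only [pvEmitBucket] at this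
      rw [this, h0]
      simp
    · rw [if_neg hge]
      have := ih (lines ++ ["- " ++ x ++ " (mentioned " ++ PySem.Int.toStr c ++ " times)"])
      simp only [pvEmitBucket] at this
      rw [this]
      obtain ⟨j, hj⟩ : ∃ j, top_n.toNat - lines.length = j + 1 := ⟨top_n.toNat - lines.length - 1, by omega⟩
      have hj' : top_n.toNat - (lines ++ ["- " ++ x ++ " (mentioned " ++ PySem.Int.toStr c ++ " times)"]).length = j := by
        simp only [List.length_append, List.length_cons, List.length_nil]
        omega
      rw [hj', List.map_cons, hj, List.take_succ_cons]
      simp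

lemma pv_emit_eq (top_n : Int) (buckets : PySem.Dict Int (List String)) (pool : List (String × Int))
    (hb : ∀ c : Int, buckets.getD c [] = (pool.filter (fun kv => kv.2 == c)).map (fun kv => kv.1)) :
    ∀ (c : Nat) (lines : List String),
      pvEmit top_n buckets c lines =
        lines ++ ((pvFlat pool c).map pvLineKV).take (top_n.toNat - lines.length) := by
  intro c
  induction c with
  | zero => intro lines; simp [pvEmit, pvFlat]
  | succ c ih =>
    intro lines
    simp only [pvEmit]
    by_cases hlt : (lines.length : Int) < top_n
    · rw [if_pos hlt, hb, pv_emitBucket_eq, ih]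
      have hmapmap :
          ((pool.filter (fun kv => kv.2 == ((c : Int) + 1))).map (fun kv => kv.1)).map
              (fun x => "- " ++ x ++ " (mentioned " ++ PySem.Int.toStr ((c : Int) + 1) ++ " times)")
            = (pool.filter (fun kv => kv.2 == ((c : Int) + 1))).map pvLineKV := by
        rw [List.map_map]
        refine List.map_congr_left ?_
        intro kv hkv
        have hkv2 : kv.2 = (c : Int) + 1 := by simpa using (List.mem_filter.mp hkv).2
        simp [pvLineKV, hkv2]
      rw [hmapmap]
      simp only [pvFlat, List.map_append, List.take_append, List.append_assoc]
      congr 1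
      congr 1
      congr 1
      simp only [List.length_append, List.length_take, List.length_map]
      omega
    · rw [if_neg hlt]
      have h0 : top_n.toNat - lines.length = 0 := by omega
      rw [h0]
      simp

-- ===== VERDICT (by name: the statement is the Claim_ definition above) =====
theorem get_top_items_py_spec : Claim_equal_get_top_items_py := by
  intro items top_n _
  unfold Spec_get_top_items_py get_top_items_py get_top_items_py_alt
  by_cases h : items = []
  · simp [h]
  · simp only [h, ite_false]
    rw [PySem.List.foldl_append_singleton_eq_map, List.nil_append,
        PySem.Dict.foldl_insert_getD_add_one_eq_counter]
    have hfun : (fun (s : PySem.Dict Int (List String) × Int) (kv : String × Int) =>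
          (s.1.modify kv.2 [] (· ++ [kv.1]), if s.2 < kv.2 then kv.2 else s.2))
        = (fun s kv => (s.1.modify kv.2 [] (· ++ [kv.1]), max s.2 kv.2)) := by
      funext s kv
      rw [Prod.mk.injEq]
      refine ⟨rfl, ?_⟩
      split <;> omega
    rw [hfun, PySem.List.foldl_prod_mk
          (fun (d : PySem.Dict Int (List String)) (kv : String × Int) => d.modify kv.2 [] (· ++ [kv.1]))
          (fun (m : Int) (kv : String × Int) => max m kv.2)
          (PySem.Dict.counter items).items PySem.Dict.empty 0]
    set pool := (PySem.Dict.counter items).items with hpool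
    have hmax := PySem.List.le_foldl_max_int pool (fun kv => kv.2) 0
    set maxc := pool.foldl (fun acc kv => max acc kv.2) 0 with hmaxc
    have h1 : ∀ kv ∈ pool, 1 ≤ kv.2 := by
      intro kv hkv
      rw [hpool, PySem.Dict.items_counter] at hkv
      obtain ⟨k, hk, rfl⟩ := List.mem_map.mp hkv
      have : k ∈ items := (PySem.Set.mem_ofList items k).mp hk
      have := List.count_pos_iff.mpr this
      show (1 : Int) ≤ ((List.count k items : Nat) : Int)
      exact_mod_cast this
    have hM : ∀ kv ∈ pool, kv.2 ≤ ((maxc.toNat : Nat) : Int) := by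
      intro kv hkv
      rw [Int.toNat_of_nonneg hmax.1]
      exact hmax.2 kv hkv
    have hb : ∀ c : Int,
        (pool.foldl (fun d kv => d.modify kv.2 [] (· ++ [kv.1])) PySem.Dict.empty).getD c []
          = (pool.filter (fun kv => kv.2 == c)).map (fun kv => kv.1) := by
      intro c
      have hswap : pool.foldl (fun d kv => d.modify kv.2 [] (· ++ [kv.1])) PySem.Dict.empty
          = (pool.map (fun kv => (kv.2, kv.1))).foldl
              (fun d p => d.modify p.1 [] (· ++ [p.2])) PySem.Dict.empty := by
        rw [List.foldl_map]
      rw [hswap, PySem.Dict.getD_foldl_modify_append]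
      simp [List.filter_map, Function.comp_def, List.map_map]
    rw [pv_emit_eq top_n _ pool hb maxc.toNat []]
    rw [← pv_sorted_eq_flat pool maxc.toNat h1 hM, List.map_take]
    rfl
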